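-- pv_equiv track=rewrite | github.com/ydb-platform/ydb | contrib/python/salt-pepper/pepper/retcode.py | validate_fail_all
-- ===== SOURCE A (Python) =====
-- def validate_fail_all(result):
--     '''
--     Validate result dictionary retcode values.
--     Returns 0 if no retcode keys.
--     Returns first non zero retcode if all recodes are non zero.
--
--     :param result: dictionary from Saltstack master
--
--     :return: exit code
--     '''
--     if isinstance(result, list):
--         if isinstance(result[0], dict):
--             minion = result[0]
--             retcodes = list(minion[name].get('retcode')
--                             for name in minion if isinstance(minion[name], dict) and
--                             minion[name].get('retcode') is not None)
--             if all(r != 0 for r in retcodes):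
--                 return next((r for r in retcodes if r != 0), 0)
--     return 0
-- ===== SOURCE B (Python) =====
-- def validate_fail_all(result):
--     '''
--     Validate result dictionary retcode values.
--     Returns 0 if no retcode keys.
--     Returns first non zero retcode if all recodes are non zero.
--     '''
--     if isinstance(result, list):
--         minion = result[0]
--         if isinstance(minion, dict):
--             first = None
--             for name in minion:
--                 value = minion[name]
--                 if isinstance(value, dict):
--                     r = value.get('retcode')
--                     if r is not None:
--                         if r == 0:
--                             return 0
--                         if first is None:
--                             first = r
--             if first is not None:
--                 return first
--     return 0
-- ===== Notes on version B (the rewrite author's own statement) =====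
-- stated objective: simpler
-- what changed: Replaces the build-retcodes-list + all() scan + next() scan with a single early-exit loop over the minion dict that returns 0 on the first zero retcode and otherwise remembers the first qualifying retcode.
import Mathlib
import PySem

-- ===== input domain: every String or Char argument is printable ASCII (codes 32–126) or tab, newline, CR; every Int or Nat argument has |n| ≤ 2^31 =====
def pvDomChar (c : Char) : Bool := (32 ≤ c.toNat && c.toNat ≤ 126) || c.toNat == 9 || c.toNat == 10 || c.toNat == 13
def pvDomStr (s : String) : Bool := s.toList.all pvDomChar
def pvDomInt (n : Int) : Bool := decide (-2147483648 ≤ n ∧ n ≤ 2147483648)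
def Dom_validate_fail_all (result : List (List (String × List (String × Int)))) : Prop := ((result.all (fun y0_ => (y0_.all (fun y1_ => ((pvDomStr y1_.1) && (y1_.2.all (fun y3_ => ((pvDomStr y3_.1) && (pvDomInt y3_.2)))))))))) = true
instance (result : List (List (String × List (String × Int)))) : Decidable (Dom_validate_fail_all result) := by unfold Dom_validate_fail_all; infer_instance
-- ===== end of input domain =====

-- B replaces A's build-retcodes-list + all() scan + next() scan with one early-exit loop
-- over the minion dict (objective: simpler). Pre_ excludes the empty list, on which A raises IndexError.


-- ===== PORT A =====
-- minion[name].get('retcode') for a key name of the minion dict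
def pvRetcode (minion : PySem.Dict String (PySem.Dict String Int)) (name : String) : Option Int :=
  (minion.get? name).bind (fun d => d.get? "retcode")

def validate_fail_all (result : List (List (String × List (String × Int)))) : Int :=
  match result with
  | [] => 0   -- Python raises IndexError here; excluded by Pre_
  | m0 :: _ =>
    let minion : PySem.Dict String (PySem.Dict String Int) :=
      PySem.Dict.ofList (m0.map (fun p => (p.1, PySem.Dict.ofList p.2)))
    -- retcodes = list comprehension over the dict's keys
    let retcodes := minion.keys.filterMap (fun name => pvRetcode minion name)
    if retcodes.all (fun r => r != 0) then
      (retcodes.find? (fun r => r != 0)).getD 0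
    else 0

-- ===== PORT B =====
def pvRetcodeB (minion : PySem.Dict String (PySem.Dict String Int)) (name : String) : Option Int :=
  (minion.get? name).bind (fun d => d.get? "retcode")

-- the single loop of Source B: early return 0 on a zero retcode, else remember the first one seen
def pvAltLoop (minion : PySem.Dict String (PySem.Dict String Int)) (names : List String) (first : Option Int) : Int :=
  match names with
  | [] => first.getD 0
  | n :: ns =>
    match pvRetcodeB minion n with
    | none => pvAltLoop minion ns first
    | some r =>
      if r = 0 then 0
      else
        match first with
        | none => pvAltLoop minion ns (some r)
        | some _ => pvAltLoop minion ns first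

def validate_fail_all_alt (result : List (List (String × List (String × Int)))) : Int :=
  match result with
  | [] => 0   -- Python raises IndexError here; excluded by Pre_
  | m0 :: _ =>
    let minion : PySem.Dict String (PySem.Dict String Int) :=
      PySem.Dict.ofList (m0.map (fun p => (p.1, PySem.Dict.ofList p.2)))
    pvAltLoop minion minion.keys none

-- ===== PRECONDITION & SPEC =====
-- Pre_ excludes only the empty outer list, where Python A (and B) raise IndexError on result[0].
def Pre_validate_fail_all (result : List (List (String × List (String × Int)))) : Prop := result ≠ []
instance (result : List (List (String × List (String × Int)))) : Decidable (Pre_validate_fail_all result) := by unfold Pre_validate_fail_all; infer_instance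
def pvWitness_validate_fail_all : (List (List (String × List (String × Int)))) := [[("m1", [("retcode", 1)]), ("m2", [("retcode", 2)])]]

def Spec_validate_fail_all (result : List (List (String × List (String × Int)))) (out : Int) : Prop := out = validate_fail_all_alt result
instance (result : List (List (String × List (String × Int)))) (out : Int) : Decidable (Spec_validate_fail_all result out) := by unfold Spec_validate_fail_all; infer_instance

-- ===== CLAIM (what is proved, stated in full; the proofs are below) =====
def Claim_equal_validate_fail_all : Prop := ∀ (result : List (List (String × List (String × Int)))), Dom_validate_fail_all result → Pre_validate_fail_all result → Spec_validate_fail_all result (validate_fail_all result)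

-- ===== LEMMAS AND PROOFS =====

-- B's loop computes A's all/find combination, by induction over the key list.
lemma pvAltLoop_eq (minion : PySem.Dict String (PySem.Dict String Int)) (ks : List String) :
    (∀ v : Int, v ≠ 0 →
      pvAltLoop minion ks (some v)
        = (if (ks.filterMap (pvRetcodeB minion)).all (fun r => r != 0) then v else 0)) ∧
    pvAltLoop minion ks none
        = (if (ks.filterMap (pvRetcodeB minion)).all (fun r => r != 0) then
            ((ks.filterMap (pvRetcodeB minion)).find? (fun r => r != 0)).getD 0
          else 0) := by
  induction ks with
  | nil => simp [pvAltLoop]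
  | cons k ks ih =>
    obtain ⟨ihs, ihn⟩ := ih
    constructor
    · intro v hv
      cases hf : pvRetcodeB minion k with
      | none => simp [pvAltLoop, hf, ihs v hv]
      | some r =>
        by_cases hr : r = 0
        · subst hr; simp [pvAltLoop, hf]
        · simp [pvAltLoop, hf, hr, ihs v hv]
    · cases hf : pvRetcodeB minion k with
      | none => simp [pvAltLoop, hf, ihn]
      | some r =>
        by_cases hr : r = 0
        · subst hr; simp [pvAltLoop, hf]
        · simp only [pvAltLoop, hf, hr, if_neg hr, List.filterMap_cons, ihs r hr]
          simp [hr]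

-- ===== VERDICT (by name: the statement is the Claim_ definition above) =====
theorem validate_fail_all_spec : Claim_equal_validate_fail_all := by
  intro result _ hpre
  unfold Spec_validate_fail_all
  match result with
  | [] => exact absurd rfl hpre
  | m0 :: rest =>
    simp only [validate_fail_all, validate_fail_all_alt]
    exact ((pvAltLoop_eq _ _).2).symm
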